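-- pv_equiv track=rewrite | github.com/zinaukarenku/zkr-questions | apiv2/parsers.py | dict_split
-- ===== SOURCE A (Python) =====
-- def dict_split(initial, field_split):
--     retlist = [{} for i in field_split]
--     for field in initial:
--         for index, split_list in enumerate(field_split):
--             if field in split_list:
--                 retlist[index][field] = initial[field]
--                 break
--     return retlist
-- ===== SOURCE B (Python) =====
-- def dict_split(initial, field_split):
--     retlist = []
--     assigned = set()
--     for split_list in field_split:
--         group = {}
--         for field in initial:
--             if field in split_list and field not in assigned:
--                 group[field] = initial[field]
--                 assigned.add(field)
--         retlist.append(group)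
--     return retlist
-- ===== Notes on version B (the rewrite author's own statement) =====
-- stated objective: alternative
-- what changed: Inverts the loop nesting: instead of scanning the groups for the first match per field (with a break), B builds one group dict at a time by a pass over the dict's keys, maintaining an explicit set of already-assigned fields that replaces the break.
import Mathlib
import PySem

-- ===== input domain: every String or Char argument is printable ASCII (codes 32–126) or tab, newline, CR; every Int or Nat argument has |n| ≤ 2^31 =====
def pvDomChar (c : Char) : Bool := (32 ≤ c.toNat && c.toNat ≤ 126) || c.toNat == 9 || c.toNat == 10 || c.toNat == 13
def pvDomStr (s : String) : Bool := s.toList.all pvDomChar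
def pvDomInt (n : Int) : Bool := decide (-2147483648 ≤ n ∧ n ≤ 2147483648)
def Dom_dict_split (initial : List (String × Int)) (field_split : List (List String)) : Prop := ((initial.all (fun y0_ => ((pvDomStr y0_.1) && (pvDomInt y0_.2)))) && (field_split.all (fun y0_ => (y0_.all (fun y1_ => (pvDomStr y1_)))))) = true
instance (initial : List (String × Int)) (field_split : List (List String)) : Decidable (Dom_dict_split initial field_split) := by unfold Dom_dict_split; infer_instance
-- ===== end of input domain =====

-- B swaps A's loop nesting: one pass per group over the dict with a claimed-fields set, instead of
-- a first-matching-group scan (with break) per field; same cost, different decomposition.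

-- ===== PORT A =====
-- inner `for index, split_list in enumerate(field_split): if field in split_list: … ; break`
def pvFirstGroup (field : String) : List (Int × List String) → Option Int
  | [] => none
  | (i, s) :: rest => if s.contains field then some i else pvFirstGroup field rest

-- body of A's outer loop: locate the first group containing `field`, put (field, initial[field]) there
def pvStepA (init : PySem.Dict String Int) (fs : List (List String))
    (retlist : List (PySem.Dict String Int)) (field : String) : List (PySem.Dict String Int) :=
  match pvFirstGroup field (PySem.List.enumerate fs 0) with
  | some index => retlist.modify index.toNat (fun d => d.insert field (init.getD field 0))
  | none => retlist

def dict_split (initial : List (String × Int)) (field_split : List (List String)) : List (List (String × Int)) :=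
  let init : PySem.Dict String Int := PySem.Dict.mk initial
  -- retlist = [{} for i in field_split]
  let retlist : List (PySem.Dict String Int) := field_split.map (fun _ => PySem.Dict.empty)
  -- for field in initial: …   (initial[field] is `getD field 0`; under Pre_ the key is always present, so this is exact)
  ((init.keys.foldl (pvStepA init field_split) retlist).map (fun d => d.items))

-- ===== PORT B =====
-- body of B's inner loop: claim `field` for the current group if it belongs to it and is unclaimed
def pvInnerB (init : PySem.Dict String Int) (split_list : List String)
    (ga : PySem.Dict String Int × PySem.Set String) (field : String) : PySem.Dict String Int × PySem.Set String :=
  if split_list.contains field && !(PySem.Set.contains ga.2 field) then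
    (ga.1.insert field (init.getD field 0), PySem.Set.add ga.2 field)
  else ga

-- body of B's outer loop: build one group's dict by a pass over the dict keys, thread `assigned`
def pvStepB (init : PySem.Dict String Int)
    (st : List (List (String × Int)) × PySem.Set String) (split_list : List String) :
    List (List (String × Int)) × PySem.Set String :=
  let ga := init.keys.foldl (pvInnerB init split_list) (PySem.Dict.empty, st.2)
  (st.1 ++ [ga.1.items], ga.2)

def dict_split_alt (initial : List (String × Int)) (field_split : List (List String)) : List (List (String × Int)) :=
  let init : PySem.Dict String Int := PySem.Dict.mk initial
  (field_split.foldl (pvStepB init) ([], PySem.Set.empty)).1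

-- ===== PRECONDITION & SPEC =====
-- `initial` is a Python dict, whose keys are necessarily distinct; Pre_ only states that dict shape
-- of the association list and excludes no input the Python function can receive.
def Pre_dict_split (initial : List (String × Int)) (field_split : List (List String)) : Prop :=
  (initial.map Prod.fst).Nodup
instance (initial : List (String × Int)) (field_split : List (List String)) : Decidable (Pre_dict_split initial field_split) := by unfold Pre_dict_split; infer_instance
def pvWitness_dict_split : (List (String × Int)) × List (List String) :=
  ([("a", 1), ("b", 2)], [["b"], ["a", "c"]])

def Spec_dict_split (initial : List (String × Int)) (field_split : List (List String)) (out : List (List (String × Int))) : Prop := out = dict_split_alt initial field_split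
instance (initial : List (String × Int)) (field_split : List (List String)) (out : List (List (String × Int))) : Decidable (Spec_dict_split initial field_split out) := by unfold Spec_dict_split; infer_instance

-- ===== CLAIM (what is proved, stated in full; the proofs are below) =====
def Claim_equal_dict_split : Prop := ∀ (initial : List (String × Int)) (field_split : List (List String)), Dom_dict_split initial field_split → Pre_dict_split initial field_split → Spec_dict_split initial field_split (dict_split initial field_split)

-- ===== LEMMAS AND PROOFS =====

-- common normal form of both ports: per group, the keys it captures; later groups see only leftover keys
def pvSpec (v : String → Int) : List String → List (List String) → List (List (String × Int))
  | _, [] => []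
  | ks, s :: rest =>
    ((ks.filter (fun k => s.contains k)).map (fun k => (k, v k)))
      :: pvSpec v (ks.filter (fun k => !s.contains k)) rest

theorem pvFirstGroup_shift (k : String) (xs : List (List String)) : ∀ n : Int,
    pvFirstGroup k (PySem.List.enumerate xs (n + 1)) = (pvFirstGroup k (PySem.List.enumerate xs n)).map (· + 1) := by
  induction xs with
  | nil => intro n; simp [PySem.List.enumerate_nil, pvFirstGroup]
  | cons s rest ih =>
    intro n
    simp only [PySem.List.enumerate_cons, pvFirstGroup]
    by_cases h : k ∈ s <;> simp [h, ih (n + 1)]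

theorem pvFirstGroup_nonneg (k : String) (xs : List (List String)) : ∀ n i : Int,
    pvFirstGroup k (PySem.List.enumerate xs n) = some i → n ≤ i := by
  induction xs with
  | nil => intro n i h; simp [PySem.List.enumerate_nil, pvFirstGroup] at h
  | cons s rest ih =>
    intro n i h
    simp only [PySem.List.enumerate_cons, pvFirstGroup] at h
    split at h
    · injection h with h'
      omega
    · have := ih (n + 1) i h; omega

theorem pvStepA_nil (init : PySem.Dict String Int) :
    ∀ (ks : List String) (r : List (PySem.Dict String Int)), ks.foldl (pvStepA init []) r = r := by
  intro ks
  induction ks with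
  | nil => intro r; rfl
  | cons k rest ih => intro r; simpa [pvStepA, PySem.List.enumerate_nil, pvFirstGroup] using ih r

theorem pvStepA_cons (init : PySem.Dict String Int) (s : List String) (rest : List (List String))
    (k : String) (hk : s.contains k = false) (d : PySem.Dict String Int) (ds : List (PySem.Dict String Int)) :
    pvStepA init (s :: rest) (d :: ds) k = d :: pvStepA init rest ds k := by
  simp only [pvStepA, PySem.List.enumerate_cons, pvFirstGroup, hk, Bool.false_eq_true, if_false]
  rw [pvFirstGroup_shift k rest 0]
  cases h : pvFirstGroup k (PySem.List.enumerate rest 0) with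
  | none => simp
  | some j =>
    have hj : 0 ≤ j := pvFirstGroup_nonneg k rest 0 j h
    have htn : (j + 1).toNat = j.toNat + 1 := by omega
    simp [htn, List.modify]

theorem pvStepA_split (init : PySem.Dict String Int) (s : List String) (rest : List (List String)) :
    ∀ (ks : List String) (d : PySem.Dict String Int) (ds : List (PySem.Dict String Int)),
    ks.foldl (pvStepA init (s :: rest)) (d :: ds)
      = ((ks.filter (fun k => s.contains k)).foldl (fun d k => d.insert k (init.getD k 0)) d)
        :: ((ks.filter (fun k => !s.contains k)).foldl (pvStepA init rest) ds) := by
  intro ks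
  induction ks with
  | nil => intro d ds; rfl
  | cons k ks ih =>
    intro d ds
    cases hm : s.contains k with
    | true =>
      have hstep : pvStepA init (s :: rest) (d :: ds) k
          = (d.insert k (init.getD k 0)) :: ds := by
        simp [pvStepA, PySem.List.enumerate_cons, pvFirstGroup, List.modify,
          (by simpa using hm : k ∈ s)]
      rw [List.foldl_cons, hstep, ih (d.insert k (init.getD k 0)) ds,
        List.filter_cons, List.filter_cons, hm]
      simp
    | false =>
      rw [List.foldl_cons, pvStepA_cons init s rest k hm d ds,
        ih d (pvStepA init rest ds k), List.filter_cons, List.filter_cons, hm]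
      simp

theorem pvA_main (init : PySem.Dict String Int) :
    ∀ (fs : List (List String)) (ks : List String), ks.Nodup →
    ((ks.foldl (pvStepA init fs) (fs.map (fun _ => PySem.Dict.empty))).map (fun d => d.items))
      = pvSpec (fun k => init.getD k 0) ks fs := by
  intro fs
  induction fs with
  | nil => intro ks _; simp [pvStepA_nil, pvSpec]
  | cons s rest ih =>
    intro ks hnd
    simp only [List.map_cons, pvStepA_split, pvSpec, List.cons_eq_cons]
    refine ⟨?_, ih (ks.filter (fun k => !s.contains k)) (hnd.filter _)⟩
    have hfresh := PySem.Dict.items_foldl_insert_fresh (ks.filter (fun k => s.contains k))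
      (fun k => k) (fun k => init.getD k 0) (PySem.Dict.empty)
      (by intro a _; simp) (by simpa using hnd.filter (fun k => s.contains k))
    simpa using hfresh

theorem pvSet_contains_add_ne {A : PySem.Set String} {k x : String} (h : x ≠ k) :
    PySem.Set.contains (PySem.Set.add A k) x = PySem.Set.contains A x := by
  simp only [PySem.Set.add]
  split
  · rfl
  · simp [h]

theorem pvInnerB_main (init : PySem.Dict String Int) (s : List String) :
    ∀ (ks : List String), ks.Nodup → ∀ (d : PySem.Dict String Int) (A : PySem.Set String),
    ks.foldl (pvInnerB init s) (d, A)
      = ((ks.filter (fun k => s.contains k && !(PySem.Set.contains A k))).foldl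
            (fun d k => d.insert k (init.getD k 0)) d,
         PySem.Set.update A (ks.filter (fun k => s.contains k && !(PySem.Set.contains A k)))) := by
  intro ks
  induction ks with
  | nil => intro _ d A; simp [PySem.Set.update]
  | cons k rest ih =>
    intro hnd d A
    have hkr : k ∉ rest := (List.nodup_cons.mp hnd).1
    have hrest : rest.Nodup := (List.nodup_cons.mp hnd).2
    have hfc : ∀ x ∈ rest,
        (s.contains x && !(PySem.Set.contains (PySem.Set.add A k) x))
          = (s.contains x && !(PySem.Set.contains A x)) := by
      intro x hx
      rw [pvSet_contains_add_ne (by rintro rfl; exact hkr hx)]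
    cases hc : (s.contains k && !(PySem.Set.contains A k)) with
    | true =>
      have hstep : pvInnerB init s (d, A) k = (d.insert k (init.getD k 0), PySem.Set.add A k) := by
        simp only [pvInnerB]; rw [hc]; simp
      have hfilter : (k :: rest).filter (fun x => s.contains x && !(PySem.Set.contains A x))
          = k :: rest.filter (fun x => s.contains x && !(PySem.Set.contains A x)) := by
        rw [List.filter_cons, hc]; simp
      rw [List.foldl_cons, hstep, ih hrest (d.insert k (init.getD k 0)) (PySem.Set.add A k),
        List.filter_congr hfc, hfilter, PySem.Set.update_cons, List.foldl_cons]
    | false =>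
      have hstep : pvInnerB init s (d, A) k = (d, A) := by
        simp only [pvInnerB]; rw [hc]; simp
      have hfilter : (k :: rest).filter (fun x => s.contains x && !(PySem.Set.contains A x))
          = rest.filter (fun x => s.contains x && !(PySem.Set.contains A x)) := by
        rw [List.filter_cons, hc]; simp
      rw [List.foldl_cons, hstep, ih hrest d A, hfilter]

theorem pvB_main (init : PySem.Dict String Int) (hnd : init.keys.Nodup) :
    ∀ (fs : List (List String)) (acc : List (List (String × Int))) (A : PySem.Set String),
    (fs.foldl (pvStepB init) (acc, A)).1
      = acc ++ pvSpec (fun k => init.getD k 0)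
          (init.keys.filter (fun k => !(PySem.Set.contains A k))) fs := by
  intro fs
  induction fs with
  | nil => intro acc A; simp [pvSpec]
  | cons s rest ih =>
    intro acc A
    have hinner := pvInnerB_main init s init.keys hnd PySem.Dict.empty A
    simp only [List.foldl_cons, pvStepB, hinner]
    set L := init.keys.filter (fun k => s.contains k && !(PySem.Set.contains A k)) with hL
    have hLnd : L.Nodup := hnd.filter _
    have hLitems : ((L.foldl (fun d k => d.insert k (init.getD k 0)) PySem.Dict.empty).items)
        = L.map (fun k => (k, init.getD k 0)) := by
      have hfresh := PySem.Dict.items_foldl_insert_fresh L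
        (fun k => k) (fun k => init.getD k 0) (PySem.Dict.empty)
        (by intro a _; simp) (by simpa using hLnd)
      simpa using hfresh
    have hxL : ∀ x, x ∈ L ↔ (x ∈ init.keys ∧ x ∈ s ∧ x ∉ A) := by
      intro x
      rw [hL]
      simp [List.mem_filter]
    have hxU : ∀ y, y ∈ PySem.Set.update A L ↔ y ∈ A ∨ y ∈ L := by
      intro y
      rw [PySem.Set.update_eq_append_filter]
      simp only [List.mem_append, List.mem_filter, PySem.Set.mem_ofList]
      constructor
      · rintro (h | ⟨h, _⟩)
        · exact Or.inl h
        · exact Or.inr h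
      · rintro (h | h)
        · exact Or.inl h
        · by_cases hA : y ∈ A
          · exact Or.inl hA
          · exact Or.inr ⟨h, by simpa [PySem.Set.contains_iff] using hA⟩
    have hA' : init.keys.filter (fun k => !(PySem.Set.contains (PySem.Set.update A L) k))
        = (init.keys.filter (fun k => !(PySem.Set.contains A k))).filter (fun k => !s.contains k) := by
      rw [List.filter_filter]
      apply List.filter_congr
      intro x hx
      by_cases hs : x ∈ s <;> by_cases hA : x ∈ A <;>
        simp [hxU, hxL, hs, hA, hx]
    rw [ih (acc ++ [(L.foldl (fun d k => d.insert k (init.getD k 0)) PySem.Dict.empty).items])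
        (PySem.Set.update A L), hA']
    simp only [pvSpec, hLitems]
    rw [List.filter_filter]
    simp [hL, List.append_assoc]

-- ===== VERDICT (by name: the statement is the Claim_ definition above) =====
theorem dict_split_spec : Claim_equal_dict_split := by
  intro initial field_split _ hpre
  unfold Spec_dict_split dict_split dict_split_alt
  have hnd : (PySem.Dict.mk initial).keys.Nodup := by
    simpa [PySem.Dict.keys_mk] using hpre
  rw [pvA_main (PySem.Dict.mk initial) field_split _ hnd,
    pvB_main (PySem.Dict.mk initial) hnd field_split [] PySem.Set.empty]
  have hfe : (PySem.Dict.mk initial).keys.filter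
      (fun k => !(PySem.Set.contains PySem.Set.empty k)) = (PySem.Dict.mk initial).keys := by
    simp [PySem.Set.empty, PySem.Set.contains]
  rw [hfe]
  simp
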